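-- pv_equiv track=rewrite | github.com/miliar/Code_Jam_Webscraper | solutions_python/Problem_201/65.py | solve
-- ===== SOURCE A (Python) =====
-- def find(hole):
--     if hole % 2 == 0:
--         return (hole // 2, hole // 2 - 1)
--     return (hole // 2, hole // 2)
--
-- def solve(n, k):
--     pool1 = n
--     pool1_size = 1
--     pool2 = n
--     pool2_size = 0
--
--     gone = 0
--     sat = 1
--     while True:
--         if gone + sat >= k:
--             index = k - gone
--             if index <= pool1_size:
--                 return find(pool1)
--             else:
--                 return find(pool2)
--
--         gone += sat
--         sat *= 2
--
--         npool1 = -1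
--         npool1_size = 0
--         npool2 = -1
--         npool2_size = 0
--
--         if pool1 % 2 == 0:
--             npool1 = pool1 // 2
--             npool1_size += pool1_size
--             npool2 = pool1 // 2 - 1
--             npool2_size += pool1_size
--         else:
--             npool1 = (pool1-1) // 2
--             npool1_size = pool1_size * 2
--
--         if pool2 % 2 == 0:
--             npool1 = pool2 // 2
--             npool1_size += pool2_size
--             npool2 = pool2 // 2 - 1
--             npool2_size += pool2_size
--         else:
--             npool2 = (pool2-1) // 2
--             npool2_size += pool2_size * 2
--
--         pool1 = npool1
--         pool1_size = npool1_size
--         pool2 = npool2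
--         pool2_size = npool2_size
-- ===== SOURCE B (Python) =====
-- def find(hole):
--     if hole % 2 == 0:
--         return (hole // 2, hole // 2 - 1)
--     return (hole // 2, hole // 2)
--
-- def solve(n, k):
--     # Closed form: person k sits during level r where 2**r <= k < 2**(r+1)
--     # (level 0 if k <= 1).  At that level the gaps have only two sizes,
--     # n // 2**r and n // 2**r - 1, and exactly (n % 2**r) + 1 of them have
--     # the larger size; people fill larger gaps first.
--     size = 1
--     while 2 * size <= k:
--         size *= 2
--     j = k - size              # 0-based rank of person k within its level
--     p = n // size             # the larger gap size present at that level
--     if j > n % size:          # only the first (n % size)+1 gaps have size p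
--         p -= 1
--     return find(p)
-- ===== Notes on version B (the rewrite author's own statement) =====
-- stated objective: simpler
-- what changed: Replaces A's round-by-round simulation of the two gap pools with a closed form: find the level size=2^r containing person k, then the gap is n//size or n//size-1 depending on whether k's rank in the level exceeds n%size.
import Mathlib
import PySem

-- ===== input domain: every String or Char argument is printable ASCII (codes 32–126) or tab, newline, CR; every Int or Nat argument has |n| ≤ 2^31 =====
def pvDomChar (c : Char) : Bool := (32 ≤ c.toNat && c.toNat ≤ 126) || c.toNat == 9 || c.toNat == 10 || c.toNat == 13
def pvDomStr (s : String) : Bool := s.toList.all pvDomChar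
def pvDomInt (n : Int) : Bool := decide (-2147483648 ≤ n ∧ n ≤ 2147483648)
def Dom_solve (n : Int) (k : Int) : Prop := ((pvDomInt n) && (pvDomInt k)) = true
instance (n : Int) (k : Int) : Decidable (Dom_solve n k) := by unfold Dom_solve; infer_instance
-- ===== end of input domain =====

-- B replaces A's round-by-round pool simulation by a closed form over k's level; proved equal for all ints.

-- ===== PORT A =====
def find (hole : Int) : Int × Int :=
  if PySem.Int.mod hole 2 = 0 then
    (PySem.Int.floordiv hole 2, PySem.Int.floordiv hole 2 - 1)
  else (PySem.Int.floordiv hole 2, PySem.Int.floordiv hole 2)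

-- the while-loop of A; fuel only makes the recursion total, k.toNat+1 rounds always suffice
def solveLoop (fuel : Nat) (k pool1 p1s pool2 p2s gone sat : Int) : Int × Int :=
  match fuel with
  | 0 => (-1, -1)  -- never reached with the fuel solve supplies
  | f+1 =>
    if gone + sat ≥ k then
      if k - gone ≤ p1s then find pool1 else find pool2
    else
      -- first if: split pool1 into (npool1, npool1_size, npool2, npool2_size)
      let t1 : Int × Int × Int × Int :=
        if PySem.Int.mod pool1 2 = 0 then
          (PySem.Int.floordiv pool1 2, 0 + p1s, PySem.Int.floordiv pool1 2 - 1, 0 + p1s)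
        else
          (PySem.Int.floordiv (pool1 - 1) 2, p1s * 2, -1, 0)
      -- second if: fold pool2 into the new pools (overwrites, as in A)
      let t2 : Int × Int × Int × Int :=
        if PySem.Int.mod pool2 2 = 0 then
          (PySem.Int.floordiv pool2 2, t1.2.1 + p2s, PySem.Int.floordiv pool2 2 - 1, t1.2.2.2 + p2s)
        else
          (t1.1, t1.2.1, PySem.Int.floordiv (pool2 - 1) 2, t1.2.2.2 + p2s * 2)
      solveLoop f k t2.1 t2.2.1 t2.2.2.1 t2.2.2.2 (gone + sat) (sat * 2)

def solve (n : Int) (k : Int) : Int × Int :=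
  solveLoop (k.toNat + 1) k n 1 n 0 0 1

-- ===== PORT B =====
-- the while-loop of Source B; fuel only makes the recursion total, k.toNat+1 doublings always suffice
def sizeLoop (fuel : Nat) (k size : Int) : Int :=
  match fuel with
  | 0 => size  -- never reached with the fuel solve_alt supplies
  | f+1 => if 2 * size ≤ k then sizeLoop f k (size * 2) else size

def solve_alt (n : Int) (k : Int) : Int × Int :=
  let size := sizeLoop (k.toNat + 1) k 1
  let j := k - size
  let p := PySem.Int.floordiv n size
  let p := if j > PySem.Int.mod n size then p - 1 else p
  find p

-- ===== PRECONDITION & SPEC =====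
def Spec_solve (n : Int) (k : Int) (out : Int × Int) : Prop := out = solve_alt n k
instance (n : Int) (k : Int) (out : Int × Int) : Decidable (Spec_solve n k out) := by unfold Spec_solve; infer_instance

-- ===== CLAIM (what is proved, stated in full; the proofs are below) =====
def Claim_equal_solve : Prop := ∀ (n : Int) (k : Int), Dom_solve n k → Spec_solve n k (solve n k)

-- ===== LEMMAS AND PROOFS =====

-- Abstract invariant of A's loop state at round r:
-- gone = 2^r-1, sat = 2^r, and the two pools describe the gaps n//2^r (count n%2^r+1)
-- and n//2^r - 1 (the rest of the 2^r gaps); or the degenerate equal-pools shape.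
def AInv (n : Int) (r : Nat) (p1 s1 p2 s2 : Int) : Prop :=
  (p1 = n / 2^r ∧ p2 = p1 - 1 ∧ s1 = n % 2^r + 1 ∧ s2 = 2^r - s1) ∨
  (p1 = n / 2^r ∧ p2 = p1 ∧ s1 = 2^r ∧ s2 = 0 ∧ n % 2^r = 2^r - 1)

lemma pysem_floordiv_pos (a b : Int) (hb : 0 < b) : PySem.Int.floordiv a b = a / b :=
  PySem.Int.floordiv_eq_ediv_of_pos hb

lemma pysem_mod_pos (a b : Int) (hb : 0 < b) : PySem.Int.mod a b = a % b :=
  PySem.Int.mod_eq_emod_of_pos hb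

lemma ediv_emod_step (n : Int) (r : Nat) :
    n / 2^(r+1) = (n / 2^r) / 2 ∧
    n % 2^(r+1) = n % 2^r + 2^r * ((n / 2^r) % 2) := by
  have hp : (0:Int) < 2^r := by positivity
  have hq := Int.mul_ediv_add_emod n (2^r)
  have hs0 : 0 ≤ n % 2^r := Int.emod_nonneg n (by omega)
  have hs1 : n % 2^r < 2^r := Int.emod_lt_of_pos n hp
  set q := n / 2^r with hqd
  set s := n % 2^r with hsd
  have h2 : (2:Int)^(r+1) = 2^r * 2 := by ring
  have hq2 : q = 2*(q/2) + q%2 := by omega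
  have hb : q % 2 = 0 ∨ q % 2 = 1 := by omega
  have key := (Int.ediv_emod_unique (a := n) (b := 2^(r+1))
    (r := s + 2^r * (q % 2)) (q := q / 2) (by positivity)).mpr ?_
  · exact ⟨key.1, by omega⟩
  · refine ⟨by linear_combination hq - (2:Int)^r * hq2, ?_, ?_⟩
    · rcases hb with h|h <;> simp [h] <;> omega
    · rcases hb with h|h <;> rw [h2] <;> simp [h] <;> omega

lemma step_inv (n : Int) (r : Nat) (p1 s1 p2 s2 : Int) (h : AInv n r p1 s1 p2 s2) :
    AInv n (r+1)
      (if PySem.Int.mod p2 2 = 0 then PySem.Int.floordiv p2 2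
       else (if PySem.Int.mod p1 2 = 0 then PySem.Int.floordiv p1 2 else PySem.Int.floordiv (p1-1) 2))
      (if PySem.Int.mod p2 2 = 0 then (if PySem.Int.mod p1 2 = 0 then 0 + s1 else s1 * 2) + s2
       else (if PySem.Int.mod p1 2 = 0 then 0 + s1 else s1 * 2))
      (if PySem.Int.mod p2 2 = 0 then PySem.Int.floordiv p2 2 - 1 else PySem.Int.floordiv (p2-1) 2)
      (if PySem.Int.mod p2 2 = 0 then (if PySem.Int.mod p1 2 = 0 then 0 + s1 else 0) + s2
       else (if PySem.Int.mod p1 2 = 0 then 0 + s1 else 0) + s2 * 2) := by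
  have m2 : ∀ x : Int, PySem.Int.mod x 2 = x % 2 := fun x => pysem_mod_pos x 2 (by norm_num)
  have f2 : ∀ x : Int, PySem.Int.floordiv x 2 = x / 2 := fun x => pysem_floordiv_pos x 2 (by norm_num)
  obtain ⟨h1, h2⟩ := ediv_emod_step n r
  have hp : (0:Int) < 2^r := by positivity
  have hs0 : 0 ≤ n % 2^r := Int.emod_nonneg n (by omega)
  have hs1 : n % 2^r < 2^r := Int.emod_lt_of_pos n hp
  have hpow : (2:Int)^(r+1) = 2 * 2^r := by ring
  simp only [m2, f2]
  rcases h with ⟨e1,e2,e3,e4⟩|⟨e1,e2,e3,e4,e5⟩ <;> subst e1 <;> subst e2 <;> subst e3 <;> subst e4 <;>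
    rcases (by omega : (n/2^r) % 2 = 0 ∨ (n/2^r) % 2 = 1) with hpar|hpar
  · -- two distinct pools, n/2^r even
    simp only [hpar, mul_zero, add_zero] at h2
    have c1 : ¬ ((n/2^r - 1) % 2 = 0) := by omega
    simp only [if_pos hpar, if_neg c1]
    left; refine ⟨by omega, by omega, by omega, by omega⟩
  · -- two distinct pools, n/2^r odd
    simp only [hpar, mul_one] at h2
    have c1 : (n/2^r - 1) % 2 = 0 := by omega
    have c2 : ¬ ((n/2^r) % 2 = 0) := by omega
    simp only [if_pos c1, if_neg c2]
    left; refine ⟨by omega, by omega, by omega, by omega⟩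
  · -- equal pools, n/2^r even
    simp only [hpar, mul_zero, add_zero] at h2
    simp only [if_pos hpar]
    left; refine ⟨by omega, by omega, by omega, by omega⟩
  · -- equal pools, n/2^r odd
    simp only [hpar, mul_one] at h2
    have c2 : ¬ ((n/2^r) % 2 = 0) := by omega
    simp only [if_neg c2]
    right; refine ⟨by omega, by omega, by omega, by omega, by omega⟩

lemma sizeLoop_eq (k : Int) :
    ∀ (f t r : Nat), t ≤ r → r ≤ t + f → (t = r ∨ (2:Int)^r ≤ k) → k < 2^(r+1) →
    sizeLoop f k (2^t) = 2^t * 2^(r-t) := by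
  intro f
  induction f with
  | zero =>
    intro t r htr hrt _ _
    have : t = r := by omega
    subst this
    simp [sizeLoop]
  | succ f ih =>
    intro t r htr hrt hor hk
    by_cases ht : t = r
    · subst ht
      have hg : ¬ (2 * (2:Int)^t ≤ k) := by
        have : (2:Int)^(t+1) = 2 * 2^t := by ring
        omega
      simp [sizeLoop, hg]
    · have htr' : t + 1 ≤ r := by omega
      have h2r : (2:Int)^r ≤ k := hor.resolve_left ht
      have hg : 2 * (2:Int)^t ≤ k := by
        have hmono : (2:Int)^(t+1) ≤ 2^r := pow_le_pow_right₀ (by norm_num) htr'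
        have : (2:Int)^(t+1) = 2 * 2^t := by ring
        omega
      have step : (2:Int)^t * 2 = 2^(t+1) := by ring
      have hrec := ih (t+1) r htr' (by omega) (Or.inr h2r) hk
      rw [sizeLoop, if_pos hg, step, hrec]
      have e : r - t = (r - (t+1)) + 1 := by omega
      rw [e]; ring

lemma sizeLoop_run (k : Int) (r : Nat) (hor : r = 0 ∨ (2:Int)^r ≤ k) (hk : k < 2^(r+1)) :
    sizeLoop (k.toNat + 1) k 1 = 2^r := by
  have hr : r ≤ k.toNat := by
    rcases hor with h|h
    · omega
    · have : (r:Int) < 2^r := by exact_mod_cast Nat.lt_two_pow_self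
      omega
  have hrec := sizeLoop_eq k (k.toNat + 1) 0 r (by omega) (by omega)
    (hor.imp (fun h => h.symm) id) hk
  simpa using hrec

lemma exit_eq (n k : Int) (r : Nat) (p1 s1 p2 s2 : Int) (hInv : AInv n r p1 s1 p2 s2)
    (hor : r = 0 ∨ (2:Int)^r ≤ k) (hex : 2^r - 1 + 2^r ≥ k) :
    (if k - (2^r - 1) ≤ s1 then find p1 else find p2) = solve_alt n k := by
  have hp : (0:Int) < 2^r := by positivity
  have hpow : (2:Int)^(r+1) = 2 * 2^r := by ring
  have hsz := sizeLoop_run k r hor (by omega)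
  have hs0 : 0 ≤ n % 2^r := Int.emod_nonneg n (by omega)
  have hs1 : n % 2^r < 2^r := Int.emod_lt_of_pos n hp
  have hdef : solve_alt n k =
      find (if k - sizeLoop (k.toNat + 1) k 1 > PySem.Int.mod n (sizeLoop (k.toNat + 1) k 1)
            then PySem.Int.floordiv n (sizeLoop (k.toNat + 1) k 1) - 1
            else PySem.Int.floordiv n (sizeLoop (k.toNat + 1) k 1)) := rfl
  rw [hdef, hsz, pysem_floordiv_pos n (2^r) hp, pysem_mod_pos n (2^r) hp]
  rcases hInv with ⟨e1,e2,e3,e4⟩|⟨e1,e2,e3,e4,e5⟩ <;> subst e1 <;> subst e2 <;> subst e3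
  · by_cases hc : k - 2^r > n % 2^r
    · rw [if_neg (by omega), if_pos hc]
    · rw [if_pos (by omega), if_neg hc]
  · rw [if_pos (by omega), if_neg (by omega)]

lemma solveLoop_eq (n k : Int) :
    ∀ (f : Nat) (r : Nat) (p1 s1 p2 s2 : Int), AInv n r p1 s1 p2 s2 →
    (r = 0 ∨ (2:Int)^r ≤ k) → k ≤ 2^r * f + (2^r - 1) →
    solveLoop (f+1) k p1 s1 p2 s2 (2^r - 1) (2^r) = solve_alt n k := by
  intro f
  induction f with
  | zero =>
    intro r p1 s1 p2 s2 hInv hor hb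
    have hp : (0:Int) < 2^r := by positivity
    simp only [Nat.cast_zero, mul_zero, zero_add] at hb
    rw [solveLoop, if_pos (by omega)]
    exact exit_eq n k r p1 s1 p2 s2 hInv hor (by omega)
  | succ f ih =>
    intro r p1 s1 p2 s2 hInv hor hb
    by_cases hex : 2^r - 1 + 2^r ≥ k
    · rw [solveLoop, if_pos hex]
      exact exit_eq n k r p1 s1 p2 s2 hInv hor hex
    · rw [solveLoop, if_neg hex]
      simp only [apply_ite (Prod.fst (α := Int) (β := Int × Int × Int)),
        apply_ite (Prod.snd (α := Int) (β := Int × Int × Int)),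
        apply_ite (Prod.fst (α := Int) (β := Int × Int)),
        apply_ite (Prod.snd (α := Int) (β := Int × Int)),
        apply_ite (Prod.fst (α := Int) (β := Int)),
        apply_ite (Prod.snd (α := Int) (β := Int))]
      have hpow : (2:Int)^(r+1) = 2 * 2^r := by ring
      have e1 : (2:Int)^r - 1 + 2^r = 2^(r+1) - 1 := by omega
      have e2 : (2:Int)^r * 2 = 2^(r+1) := by ring
      rw [e1, e2]
      have hstep := step_inv n r p1 s1 p2 s2 hInv
      have hor' : r + 1 = 0 ∨ (2:Int)^(r+1) ≤ k := Or.inr (by omega)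
      have hb' : k ≤ 2^(r+1) * f + (2^(r+1) - 1) := by
        have hp : (0:Int) < 2^r := by positivity
        have hf0 : (0:Int) ≤ (f:Int) := by positivity
        have hmul : (2:Int)^r * (f:Int) ≤ 2^(r+1) * (f:Int) :=
          mul_le_mul_of_nonneg_right (by omega) hf0
        have hexp : (2:Int)^r * ((f:Int)+1) = 2^r * (f:Int) + 2^r := by ring
        push_cast at hb
        linarith
      exact ih (r+1) _ _ _ _ hstep hor' hb'

-- ===== VERDICT (by name: the statement is the Claim_ definition above) =====
theorem solve_spec : Claim_equal_solve := by
  intro n k _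
  show solve n k = solve_alt n k
  unfold solve
  have h := solveLoop_eq n k k.toNat 0 n 1 n 0 ?_ (Or.inl rfl) ?_
  · simpa using h
  · right
    refine ⟨by omega, rfl, by norm_num, rfl, by omega⟩
  · have := Int.self_le_toNat k
    simp only [pow_zero, one_mul]
    omega
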